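-- pv_equiv track=rewrite | github.com/deepa4823/Python-basics | encrypt.py | process
-- ===== SOURCE A (Python) =====
-- def process(n):
-- #max and count
--     mx=-999
--     c=0
--     ans=0
--     while n>0:
--         digit=n%10
--         if digit>mx:
--             mx=digit
--         c=c+1
--         n=n//10
--
--             #arrange
--     while c>0:
--         ans=ans*10+mx
--         c=c-1
--     return ans
-- ===== SOURCE B (Python) =====
-- def _scan(n):
--     # returns (max digit of n, number of digits of n) for 0 <= n
--     if n < 10:
--         return n, 1
--     d, k = _scan(n // 10)
--     return max(n % 10, d), k + 1
--
-- def process(n):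
--     if n <= 0:
--         return 0
--     d, k = _scan(n)
--     return d * (10 ** k - 1) // 9
-- ===== Notes on version B (the rewrite author's own statement) =====
-- stated objective: alternative
-- what changed: Replaces A's two iterative while-loops (accumulator-based digit scan, then building the answer digit by digit) with one recursive digit scan returning (max digit, digit count) and a closed-form repunit formula d*(10**k-1)//9 instead of the whole second loop.
import Mathlib
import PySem

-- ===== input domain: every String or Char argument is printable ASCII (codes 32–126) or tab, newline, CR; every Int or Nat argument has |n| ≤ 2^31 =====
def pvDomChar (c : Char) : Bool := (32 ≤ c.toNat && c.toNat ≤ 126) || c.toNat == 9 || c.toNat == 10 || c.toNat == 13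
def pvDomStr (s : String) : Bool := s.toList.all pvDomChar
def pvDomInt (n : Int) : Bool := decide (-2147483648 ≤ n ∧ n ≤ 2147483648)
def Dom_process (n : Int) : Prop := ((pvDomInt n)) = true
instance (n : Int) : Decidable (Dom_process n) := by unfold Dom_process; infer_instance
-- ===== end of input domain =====

-- B replaces A's two while-loops with one recursive digit scan plus a closed-form repunit
-- formula for the final number (alternative decomposition, same asymptotic cost).

-- ===== PORT A =====
-- first while-loop of A: state (n, mx, c)
def processLoop1 (n mx c : Int) : Int × Int :=
  if h : n > 0 then
    let digit := PySem.Int.mod n 10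
    processLoop1 (PySem.Int.floordiv n 10) (if digit > mx then digit else mx) (c + 1)
  else
    (mx, c)
termination_by n.toNat
decreasing_by
  rw [PySem.Int.floordiv_eq_ediv_of_pos (by omega : (0:Int) < 10)]
  omega

-- second while-loop of A: state (c, ans) with fixed mx
def processLoop2 (c mx ans : Int) : Int :=
  if h : c > 0 then
    processLoop2 (c - 1) mx (ans * 10 + mx)
  else
    ans
termination_by c.toNat
decreasing_by omega

def process (n : Int) : Int :=
  let p := processLoop1 n (-999) 0
  processLoop2 p.2 p.1 0

-- ===== PORT B =====
-- recursive scan of Source B: returns (max digit, digit count)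
def scanB (n : Int) : Int × Int :=
  if h : n < 10 then
    (n, 1)
  else
    let p := scanB (PySem.Int.floordiv n 10)
    (max (PySem.Int.mod n 10) p.1, p.2 + 1)
termination_by n.toNat
decreasing_by
  rw [PySem.Int.floordiv_eq_ediv_of_pos (by omega : (0:Int) < 10)]
  omega

def process_alt (n : Int) : Int :=
  if n ≤ 0 then 0
  else
    let p := scanB n
    PySem.Int.floordiv (p.1 * (10 ^ p.2.toNat - 1)) 9

-- ===== PRECONDITION & SPEC =====
def Spec_process (n : Int) (out : Int) : Prop := out = process_alt n
instance (n : Int) (out : Int) : Decidable (Spec_process n out) := by unfold Spec_process; infer_instance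

-- ===== CLAIM (what is proved, stated in full; the proofs are below) =====
def Claim_equal_process : Prop := ∀ (n : Int), Dom_process n → Spec_process n (process n)

-- ===== LEMMAS AND PROOFS =====

-- repunit with k digits 1 (proof-only helper)
def repu : Nat → Int
  | 0 => 0
  | k + 1 => repu k + 10 ^ k

theorem nine_mul_repu (k : Nat) : 9 * repu k = 10 ^ k - 1 := by
  induction k with
  | zero => simp [repu]
  | succ k ih => simp only [repu, pow_succ]; ring_nf; ring_nf at ih; omega

theorem floordiv_ten_facts (n : Int) :
    10 * PySem.Int.floordiv n 10 + PySem.Int.mod n 10 = n ∧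
      0 ≤ PySem.Int.mod n 10 ∧ PySem.Int.mod n 10 < 10 := by
  rw [PySem.Int.floordiv_eq_ediv_of_pos (by omega : (0:Int) < 10),
      PySem.Int.mod_eq_emod_of_pos (by omega : (0:Int) < 10)]
  have hq := Int.mul_ediv_add_emod n 10
  have hr0 := Int.emod_nonneg n (by omega : (10:Int) ≠ 0)
  have hr1 := Int.emod_lt_of_pos n (by omega : (0:Int) < 10)
  omega

theorem scanB_fst_nonneg (n : Int) : 0 ≤ n → 0 ≤ (scanB n).1 := by
  induction n using scanB.induct with
  | case1 n h =>
    intro hn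
    rw [scanB]
    simpa [h] using hn
  | case2 n h ih =>
    intro hn
    rw [scanB]
    simp only [h, dite_false]
    exact le_trans (floordiv_ten_facts n).2.1 (le_max_left _ _)

theorem loop1_eq_scanB (n : Int) (hn : 0 < n) (mx c : Int) :
    processLoop1 n mx c = (max (scanB n).1 mx, c + (scanB n).2) := by
  induction n using scanB.induct generalizing mx c with
  | case1 n h =>
    have hf := floordiv_ten_facts n
    have hq : PySem.Int.floordiv n 10 = 0 := by omega
    have hd : PySem.Int.mod n 10 = n := by omega
    rw [processLoop1]
    simp only [hn, dite_true, hq, hd]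
    rw [processLoop1]
    simp only [show ¬ ((0:Int) > 0) by omega, dite_false]
    rw [scanB]
    simp only [h, dite_true]
    have hmax : (if n > mx then n else mx) = max n mx := by
      rcases le_or_gt n mx with h' | h' <;> simp [max_def] <;> omega
    rw [hmax]
  | case2 n h ih =>
    have hf := floordiv_ten_facts n
    have hq : 0 < PySem.Int.floordiv n 10 := by omega
    rw [processLoop1]
    simp only [hn, dite_true]
    rw [ih hq]
    conv_rhs => rw [scanB]
    simp only [h, dite_false, Prod.mk.injEq]
    set d := PySem.Int.mod n 10 with hd
    refine ⟨?_, by ring⟩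
    rcases le_or_gt d mx with h' | h' <;> simp [max_def] <;> omega

theorem loop2_eq (c mx ans : Int) :
    processLoop2 c mx ans = ans * 10 ^ c.toNat + mx * repu c.toNat := by
  induction c, ans using processLoop2.induct (mx := mx) with
  | case1 c ans h ih =>
    rw [processLoop2]
    simp only [h, dite_true]
    rw [ih]
    have hk : c.toNat = (c - 1).toNat + 1 := by omega
    rw [hk]
    simp only [repu, pow_succ]
    ring
  | case2 c ans h =>
    rw [processLoop2]
    have hc : c.toNat = 0 := by omega
    simp [h, hc, repu]

theorem mul_repu_eq_floordiv (m : Int) (k : Nat) :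
    m * repu k = PySem.Int.floordiv (m * (10 ^ k - 1)) 9 := by
  rw [PySem.Int.floordiv_eq_ediv_of_pos (by omega : (0:Int) < 9)]
  rw [← nine_mul_repu]
  rw [show m * (9 * repu k) = 9 * (m * repu k) by ring]
  rw [Int.mul_ediv_cancel_left _ (by omega : (9:Int) ≠ 0)]

-- ===== VERDICT (by name: the statement is the Claim_ definition above) =====
theorem process_spec : Claim_equal_process := by
  intro n _
  unfold Spec_process process process_alt
  rcases le_or_gt n 0 with hle | hpos
  · rw [processLoop1]
    simp only [show ¬ (n > 0) by omega, dite_false]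
    rw [processLoop2]
    simp [hle]
  · simp only [show ¬ (n ≤ 0) by omega, if_false]
    rw [loop1_eq_scanB n hpos]
    have hmx : max (scanB n).1 (-999 : Int) = (scanB n).1 := by
      have := scanB_fst_nonneg n (by omega)
      simp [max_def]
      omega
    simp only [hmx, zero_add]
    rw [loop2_eq, mul_repu_eq_floordiv]
    ring
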